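-- pv_equiv track=rewrite | github.com/tonmoy50/Indiana-University | Fall 2023/B551/Assignment1/place_turrets.py | is_conflict_right
-- ===== SOURCE A (Python) =====
-- def is_conflict_right(castle_map, turret_position):
--     i = turret_position[1] + 1
--     while i < len(castle_map[0]):
--         if castle_map[turret_position[0]][i] == "p":
--             return True
--         elif castle_map[turret_position[0]][i] in "X@":
--             return False
--         i += 1
--     return False
-- ===== SOURCE B (Python) =====
-- def is_conflict_right(castle_map, turret_position):
--     r, c = turret_position
--     width = len(castle_map[0])
--     if c + 1 >= width:
--         return False
--     seg = castle_map[r][c + 1:width]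
--     p = seg.find('p')
--     if p == -1:
--         return False
--     x = seg.find('X')
--     a = seg.find('@')
--     wall = min(x if x != -1 else len(seg), a if a != -1 else len(seg))
--     return p < wall
-- ===== Notes on version B (the rewrite author's own statement) =====
-- stated objective: simpler
-- what changed: Replaces A's single early-exit cell loop with an empty-range width test plus a slice that builds the rightward segment once and three independent str.find scans ('p','X','@') whose indices are compared (missing wall mapped to the segment length).
-- outside the precondition, e.g. on is_conflict_right(['pXX.'], (0, -2)): A returns True, B returns False; on is_conflict_right(['.Xp', 'pX'], (1, 0)): A returns False, B returns False
import Mathlib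
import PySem

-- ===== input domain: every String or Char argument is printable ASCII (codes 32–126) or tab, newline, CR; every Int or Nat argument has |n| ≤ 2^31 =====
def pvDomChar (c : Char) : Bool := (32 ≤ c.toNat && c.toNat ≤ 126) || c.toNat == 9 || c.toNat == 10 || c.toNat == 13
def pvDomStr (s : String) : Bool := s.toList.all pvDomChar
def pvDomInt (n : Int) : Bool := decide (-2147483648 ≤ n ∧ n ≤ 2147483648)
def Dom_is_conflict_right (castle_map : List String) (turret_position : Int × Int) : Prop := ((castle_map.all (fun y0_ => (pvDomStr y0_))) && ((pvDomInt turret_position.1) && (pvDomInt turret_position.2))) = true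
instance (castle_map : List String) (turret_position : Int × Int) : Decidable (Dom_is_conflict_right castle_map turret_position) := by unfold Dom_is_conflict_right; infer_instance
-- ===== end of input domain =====

-- B replaces A's single early-exit index loop by building the rightward segment with a slice and
-- comparing three library find indices (objective: simpler decomposition; no speed claim).


-- ===== PORT A =====
-- the while loop of A; fuel = (len0 - i).toNat, which bounds the remaining iterations exactly.
-- 'none => false' arms are where the Python raises IndexError (excluded by Pre_).
def pvLoopA (castle_map : List String) (r : Int) (len0 : Int) (i : Int) : Nat → Bool
  | 0 => false
  | fuel + 1 =>
    if i < len0 then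
      match PySem.List.pyGet? castle_map r with
      | none => false
      | some row =>
        match PySem.Str.pyGet? row i with
        | none => false
        | some ch =>
          if ch = 'p' then true
          else if ch = 'X' ∨ ch = '@' then false
          else pvLoopA castle_map r len0 (i + 1) fuel
    else false

def is_conflict_right (castle_map : List String) (turret_position : Int × Int) : Bool :=
  match PySem.List.pyGet? castle_map 0 with
  | none => false   -- Python raises IndexError here (empty map); excluded by Pre_
  | some row0 =>
    let len0 : Int := PySem.Str.len row0
    pvLoopA castle_map turret_position.1 len0 (turret_position.2 + 1)
      (len0 - (turret_position.2 + 1)).toNat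

-- ===== PORT B =====
def is_conflict_right_alt (castle_map : List String) (turret_position : Int × Int) : Bool :=
  match PySem.List.pyGet? castle_map 0 with
  | none => false   -- Python raises IndexError here (empty map); excluded by Pre_
  | some row0 =>
    let width : Int := PySem.Str.len row0
    if turret_position.2 + 1 ≥ width then false
    else
      match PySem.List.pyGet? castle_map turret_position.1 with
      | none => false   -- Python raises IndexError here; excluded by Pre_
      | some row =>
        let seg := PySem.Str.slice row (some (turret_position.2 + 1)) (some width)
        let p := PySem.Str.find seg "p"
        if p = -1 then false
        else
          let x := PySem.Str.find seg "X"
          let a := PySem.Str.find seg "@"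
          let wall := min (if x ≠ -1 then x else PySem.Str.len seg)
                          (if a ≠ -1 then a else PySem.Str.len seg)
          decide (p < wall)

-- ===== PRECONDITION & SPEC =====
-- the row the turret position selects (Python list indexing: a negative in-range index counts from the end)
def pvRow (castle_map : List String) (r : Int) : String :=
  castle_map.getD (if r < 0 then (r + castle_map.length).toNat else r.toNat) ""

-- Pre_ restricts to the inputs where the scan is well defined: a non-empty map and either an
-- empty scan range (the column is at or beyond the end of row 0, so A's loop never runs) or an
-- in-range row index, a column ≥ -1 and row r at least as long as row 0. It excludes (a) columns
-- ≤ -2 reaching a nonempty range, where A's value comes from accidental negative-index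
-- wraparound, and (b) ragged maps whose row r is shorter than row 0, on which A raises IndexError
-- mid-scan unless it exits early on a 'p'/'X'/'@' (and then B agrees with it anyway).
def Pre_is_conflict_right (castle_map : List String) (turret_position : Int × Int) : Prop :=
  castle_map ≠ [] ∧
  ((((castle_map.headD "").toList.length : Int) ≤ turret_position.2 + 1) ∨
    (-(castle_map.length : Int) ≤ turret_position.1 ∧
     turret_position.1 < (castle_map.length : Int) ∧ -1 ≤ turret_position.2 ∧
     (castle_map.headD "").toList.length ≤ (pvRow castle_map turret_position.1).toList.length))
instance (castle_map : List String) (turret_position : Int × Int) : Decidable (Pre_is_conflict_right castle_map turret_position) := by unfold Pre_is_conflict_right; infer_instance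

def pvWitness_is_conflict_right : List String × (Int × Int) := (["p@p", "ppX"], (1, 0))

def Spec_is_conflict_right (castle_map : List String) (turret_position : Int × Int) (out : Bool) : Prop := out = is_conflict_right_alt castle_map turret_position
instance (castle_map : List String) (turret_position : Int × Int) (out : Bool) : Decidable (Spec_is_conflict_right castle_map turret_position out) := by unfold Spec_is_conflict_right; infer_instance

-- ===== CLAIM (what is proved, stated in full; the proofs are below) =====
def Claim_equal_is_conflict_right : Prop := ∀ (castle_map : List String) (turret_position : Int × Int), Dom_is_conflict_right castle_map turret_position → Pre_is_conflict_right castle_map turret_position → Spec_is_conflict_right castle_map turret_position (is_conflict_right castle_map turret_position)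

-- ===== LEMMAS AND PROOFS =====

-- the common semantics: first 'p'/'X'/'@' in the rightward segment decides
def pvScan : List Char → Bool
  | [] => false
  | c :: t =>
    if c = 'p' then true
    else if c = 'X' ∨ c = '@' then false
    else pvScan t

theorem pvGo_ge (sub : List Char) (hsub : sub ≠ []) :
    ∀ (t : List Char) (k : Nat),
      PySem.Chars.find.go sub t k = -1 ∨ (k : Int) ≤ PySem.Chars.find.go sub t k := by
  intro t
  induction t with
  | nil => intro k; left; simp [PySem.Chars.find.go, List.isEmpty_iff, hsub]
  | cons c t ih =>
    intro k
    simp only [PySem.Chars.find.go]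
    by_cases hp : sub.isPrefixOf (c :: t) = true
    · right; simp [hp]
    · simp only [hp, Bool.false_eq_true, if_false]
      rcases ih (k + 1) with h | h
      · left; exact h
      · right; push_cast at h ⊢; omega

theorem pvGo_shift (sub : List Char) (hsub : sub ≠ []) :
    ∀ (t : List Char) (k : Nat),
      PySem.Chars.find.go sub t k =
        if PySem.Chars.find.go sub t 0 = -1 then -1 else PySem.Chars.find.go sub t 0 + k := by
  intro t
  induction t with
  | nil => intro k; simp [PySem.Chars.find.go, List.isEmpty_iff, hsub]
  | cons c t ih =>
    intro k
    simp only [PySem.Chars.find.go]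
    by_cases hp : sub.isPrefixOf (c :: t) = true
    · simp [hp]
    · simp only [hp, Bool.false_eq_true, if_false]
      rw [ih (k + 1)]
      by_cases h : PySem.Chars.find.go sub t 0 = -1
      · simp [h, ih 1]
      · have hg0 : 0 ≤ PySem.Chars.find.go sub t 0 := by
          rcases pvGo_ge sub hsub t 0 with h' | h' <;> omega
        rw [ih 1, if_neg h, if_neg (by push_cast; omega), if_neg h]
        push_cast; ring

theorem pvFind_cons (c : Char) (t : List Char) (a : Char) :
    PySem.Chars.find (c :: t) [a] =
      if c = a then 0
      else if PySem.Chars.find t [a] = -1 then -1 else PySem.Chars.find t [a] + 1 := by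
  simp only [PySem.Chars.find, PySem.Chars.find.go]
  have hpre : [a].isPrefixOf (c :: t) = (a == c) := by
    simp [List.isPrefixOf]
  rw [hpre, pvGo_shift [a] (by simp) t 1]
  by_cases h : c = a
  · simp [h]
  · have : (a == c) = false := by simp [Ne.symm h]
    simp [this, h]

theorem pvFind_nil (a : Char) : PySem.Chars.find ([] : List Char) [a] = -1 := by
  simp [PySem.Chars.find, PySem.Chars.find.go]

def pvBexpr (l : List Char) : Bool :=
  let p := PySem.Chars.find l ['p']
  if p = -1 then false
  else
    let x := PySem.Chars.find l ['X']
    let a := PySem.Chars.find l ['@']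
    let wall := min (if x ≠ -1 then x else (l.length : Int))
                    (if a ≠ -1 then a else (l.length : Int))
    decide (p < wall)

theorem pvBexpr_eq_scan : ∀ (l : List Char), pvBexpr l = pvScan l := by
  intro l
  induction l with
  | nil => simp [pvBexpr, pvScan, pvFind_nil]
  | cons c t ih =>
    have hp := PySem.Chars.neg_one_le_find t ['p']
    have hx := PySem.Chars.neg_one_le_find t ['X']
    have ha := PySem.Chars.neg_one_le_find t ['@']
    rw [pvScan, ← ih]
    unfold pvBexpr
    simp only [pvFind_cons, List.length_cons]
    by_cases hcp : c = 'p'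
    · subst hcp
      simp only [if_pos rfl, if_neg (by decide : ¬ ('p' : Char) = 'X'),
        if_neg (by decide : ¬ ('p' : Char) = '@'),
        if_neg (by decide : ¬ (('p' : Char) = 'X' ∨ ('p' : Char) = '@')), if_pos rfl]
      split_ifs with h1 h2 h3 <;> simp_all [lt_min_iff, min_lt_iff] <;> omega
    · by_cases hcx : c = 'X'
      · subst hcx
        simp only [if_neg (by decide : ¬ ('X' : Char) = 'p'), if_pos rfl,
          if_neg (by decide : ¬ ('X' : Char) = '@'),
          if_pos (by decide : (('X' : Char) = 'X' ∨ ('X' : Char) = '@'))]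
        split_ifs with h1 h2 h3 <;> simp_all [lt_min_iff, min_lt_iff] <;> omega
      · by_cases hca : c = '@'
        · subst hca
          simp only [if_neg (by decide : ¬ ('@' : Char) = 'p'),
            if_neg (by decide : ¬ ('@' : Char) = 'X'), if_pos rfl,
            if_pos (by decide : (('@' : Char) = 'X' ∨ ('@' : Char) = '@'))]
          split_ifs with h1 h2 h3 <;> simp_all [lt_min_iff, min_lt_iff] <;> omega
        · have hor : ¬ (c = 'X' ∨ c = '@') := by tauto
          simp only [if_neg hcp, if_neg hcx, if_neg hca, if_neg hor]
          split_ifs <;> simp_all [lt_min_iff, min_lt_iff] <;> omega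

theorem pvLoopA_eq_scan (castle_map : List String) (r : Int) (row : String) (len0 : Int)
    (hrow : PySem.List.pyGet? castle_map r = some row)
    (hlen : len0.toNat ≤ row.toList.length) :
    ∀ (fuel : Nat) (i : Int), 0 ≤ i → fuel = (len0 - i).toNat →
      pvLoopA castle_map r len0 i fuel =
        pvScan ((row.toList.drop i.toNat).take (len0.toNat - i.toNat)) := by
  intro fuel
  induction fuel with
  | zero =>
    intro i hi hf
    have h1 : len0 ≤ i := by omega
    have h2 : len0.toNat ≤ i.toNat := by omega
    have : len0.toNat - i.toNat = 0 := by omega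
    simp [pvLoopA, this, pvScan]
  | succ fuel ih =>
    intro i hi hf
    have hilt : i < len0 := by omega
    have hnat : i.toNat < len0.toNat := by omega
    have hL : i.toNat < row.toList.length := by omega
    have hget : PySem.Str.pyGet? row i = some (row.toList[i.toNat]) := by
      conv_lhs => rw [show i = ((i.toNat : Nat) : Int) from by omega]
      rw [PySem.Str.pyGet?_natCast]
      exact List.getElem?_eq_getElem hL
    simp only [pvLoopA, if_pos hilt, hrow, hget]
    have hdrop : row.toList.drop i.toNat = row.toList[i.toNat] :: row.toList.drop (i.toNat + 1) :=
      List.drop_eq_getElem_cons hL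
    have htake : len0.toNat - i.toNat = (len0.toNat - (i.toNat + 1)) + 1 := by omega
    rw [hdrop, htake, List.take_succ_cons]
    have hnext : (i + 1).toNat = i.toNat + 1 := by omega
    have hr := ih (i + 1) (by omega) (by omega)
    rw [hnext] at hr
    simp only [pvScan]
    rw [hr]

theorem pvRow_some (castle_map : List String) (r : Int)
    (h1 : -(castle_map.length : Int) ≤ r) (h2 : r < (castle_map.length : Int)) :
    PySem.List.pyGet? castle_map r = some (pvRow castle_map r) := by
  unfold pvRow
  by_cases hr : r < 0
  · have hlt : (r + castle_map.length).toNat < castle_map.length := by omega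
    simp only [PySem.List.pyGet?, PySem.List.pyIdx?, if_neg (by omega : ¬ (0:Int) ≤ r),
      if_pos h1, Option.bind_some, if_pos hr]
    rw [List.getD_eq_getElem _ _ hlt,
      show castle_map.length - (-r).toNat = (r + castle_map.length).toNat from by omega]
    exact List.getElem?_eq_getElem hlt
  · have hlt : r.toNat < castle_map.length := by omega
    simp only [PySem.List.pyGet?, PySem.List.pyIdx?, if_pos (by omega : (0:Int) ≤ r),
      if_pos h2, Option.bind_some, if_neg hr]
    rw [List.getD_eq_getElem _ _ hlt, List.getElem?_eq_getElem hlt]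

theorem pvRow0_some (castle_map : List String) (hne : castle_map ≠ []) :
    PySem.List.pyGet? castle_map 0 = some (castle_map.headD "") := by
  have h0 : (0 : Int) = ((0 : Nat) : Int) := rfl
  rw [h0, PySem.List.pyGet?_natCast]
  cases castle_map with
  | nil => exact absurd rfl hne
  | cons a l => rfl

theorem pvAlt_eq_scan (castle_map : List String) (turret_position : Int × Int)
    (hne : castle_map ≠ []) (h1 : -(castle_map.length : Int) ≤ turret_position.1)
    (h2 : turret_position.1 < (castle_map.length : Int)) (h3 : -1 ≤ turret_position.2)
    (hv : turret_position.2 + 1 < (((castle_map.headD "").toList.length : Int))) :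
    is_conflict_right_alt castle_map turret_position =
      pvScan (((pvRow castle_map turret_position.1).toList.drop (turret_position.2 + 1).toNat).take
        ((castle_map.headD "").toList.length - (turret_position.2 + 1).toNat)) := by
  have hrow := pvRow_some castle_map turret_position.1 h1 h2
  have hrow0 := pvRow0_some castle_map hne
  set row := pvRow castle_map turret_position.1
  set row0 := castle_map.headD ""
  unfold is_conflict_right_alt
  rw [hrow, hrow0]
  have hwidth : PySem.Str.len row0 = ((row0.toList.length : Nat) : Int) := by
    simp [PySem.Str.len_eq]
  dsimp only
  rw [if_neg (by rw [hwidth]; omega)]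
  have hc1 : (0 : Int) ≤ turret_position.2 + 1 := by omega
  have hsegL : (PySem.Str.slice row (some (turret_position.2 + 1))
        (some ((row0.toList.length : Int)))).toList
      = (row.toList.drop (turret_position.2 + 1).toNat).take
          (row0.toList.length - (turret_position.2 + 1).toNat) := by
    rw [PySem.Str.toList_slice, PySem.Chars.slice_eq_listSlice,
      PySem.List.slice_toNat _ hc1 (by positivity)]
    simp
  rw [← pvBexpr_eq_scan]
  simp only [pvBexpr, PySem.Str.find_eq, PySem.Str.len_eq, hsegL]
  rfl

-- the vacuous case on B's side: the width test fires, B never touches row r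
theorem pvB_vacuous (castle_map : List String) (turret_position : Int × Int)
    (hne : castle_map ≠ [])
    (hl : ((castle_map.headD "").toList.length : Int) ≤ turret_position.2 + 1) :
    is_conflict_right_alt castle_map turret_position = false := by
  have hrow0 := pvRow0_some castle_map hne
  unfold is_conflict_right_alt
  rw [hrow0]
  have hwidth : PySem.Str.len (castle_map.headD "") =
      (((castle_map.headD "").toList.length : Nat) : Int) := by
    simp [PySem.Str.len_eq]
  dsimp only
  rw [if_pos (by rw [hwidth]; omega)]

theorem pvA_eq_scan (castle_map : List String) (turret_position : Int × Int)
    (hne : castle_map ≠ []) (h1 : -(castle_map.length : Int) ≤ turret_position.1)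
    (h2 : turret_position.1 < (castle_map.length : Int)) (h3 : -1 ≤ turret_position.2)
    (h5 : (castle_map.headD "").toList.length ≤ (pvRow castle_map turret_position.1).toList.length) :
    is_conflict_right castle_map turret_position =
      pvScan (((pvRow castle_map turret_position.1).toList.drop (turret_position.2 + 1).toNat).take
        ((castle_map.headD "").toList.length - (turret_position.2 + 1).toNat)) := by
  have hrow := pvRow_some castle_map turret_position.1 h1 h2
  have hrow0 := pvRow0_some castle_map hne
  unfold is_conflict_right
  rw [hrow0]
  show pvLoopA castle_map turret_position.1 (PySem.Str.len (castle_map.headD ""))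
      (turret_position.2 + 1)
      (PySem.Str.len (castle_map.headD "") - (turret_position.2 + 1)).toNat = _
  have hlen0' : (PySem.Str.len (castle_map.headD "")) = ((castle_map.headD "").toList.length : Int) := by
    simp [PySem.Str.len_eq]
  have hlenle : (PySem.Str.len (castle_map.headD "")).toNat
      ≤ (pvRow castle_map turret_position.1).toList.length := by
    rw [hlen0']; omega
  have := pvLoopA_eq_scan castle_map turret_position.1
      (pvRow castle_map turret_position.1) (PySem.Str.len (castle_map.headD ""))
      hrow hlenle
      ((PySem.Str.len (castle_map.headD "") - (turret_position.2 + 1)).toNat)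
      (turret_position.2 + 1) (by omega) rfl
  rw [this, hlen0']
  simp only [Int.toNat_natCast]

-- the vacuous case: the scan range is empty, A's loop never runs
theorem pvA_vacuous (castle_map : List String) (turret_position : Int × Int)
    (hne : castle_map ≠ [])
    (hl : ((castle_map.headD "").toList.length : Int) ≤ turret_position.2 + 1) :
    is_conflict_right castle_map turret_position = false := by
  have hrow0 := pvRow0_some castle_map hne
  unfold is_conflict_right
  rw [hrow0]
  show pvLoopA castle_map turret_position.1 (PySem.Str.len (castle_map.headD ""))
      (turret_position.2 + 1)
      (PySem.Str.len (castle_map.headD "") - (turret_position.2 + 1)).toNat = false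
  have hlen0' : (PySem.Str.len (castle_map.headD "")) = ((castle_map.headD "").toList.length : Int) := by
    simp [PySem.Str.len_eq]
  have h0 : (PySem.Str.len (castle_map.headD "") - (turret_position.2 + 1)).toNat = 0 := by
    omega
  rw [h0]
  rfl

-- ===== VERDICT (by name: the statement is the Claim_ definition above) =====
theorem is_conflict_right_spec : Claim_equal_is_conflict_right := by
  intro castle_map turret_position _ hpre
  obtain ⟨hne, hcase⟩ := hpre
  unfold Spec_is_conflict_right
  by_cases hv : ((castle_map.headD "").toList.length : Int) ≤ turret_position.2 + 1
  · rw [pvA_vacuous castle_map turret_position hne hv,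
      pvB_vacuous castle_map turret_position hne hv]
  · have h2' : -(castle_map.length : Int) ≤ turret_position.1 ∧
        turret_position.1 < (castle_map.length : Int) ∧ -1 ≤ turret_position.2 ∧
        (castle_map.headD "").toList.length ≤ (pvRow castle_map turret_position.1).toList.length := by
      tauto
    obtain ⟨h1, h2, h3, h5⟩ := h2'
    rw [pvAlt_eq_scan castle_map turret_position hne h1 h2 h3 (by omega),
      pvA_eq_scan castle_map turret_position hne h1 h2 h3 h5]
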